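-- pv_equiv track=rewrite | github.com/Naviersh/sber_hw1 | hw2.py | ex5
-- ===== SOURCE A (Python) =====
-- from collections import Counter
--
-- def ex5(mas):
--     c = Counter(mas)
--     c.most_common()
--     new_mas = []
--     for key, value in dict(c).items():
--         for v in range(value):
--             new_mas.append(key)
--     return new_mas
-- ===== SOURCE B (Python) =====
-- def ex5(mas):
--     out = []
--     seen = []
--     for x in mas:
--         if x not in seen:
--             seen.append(x)
--             out += [y for y in mas if y == x]
--     return out
-- ===== Notes on version B (the rewrite author's own statement) =====
-- stated objective: alternative
-- what changed: Replaces Counter + dead most_common() + nested range(count) rebuild over a count table by a mapping-free nested-scan brute force: a plain 'seen' list detects first occurrences and, at each one, a fresh comprehension pass over mas gathers all equal elements; trades the O(n) hash-count algorithm for an O(n*k) scan-based one with no dict at all.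
import Mathlib
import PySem

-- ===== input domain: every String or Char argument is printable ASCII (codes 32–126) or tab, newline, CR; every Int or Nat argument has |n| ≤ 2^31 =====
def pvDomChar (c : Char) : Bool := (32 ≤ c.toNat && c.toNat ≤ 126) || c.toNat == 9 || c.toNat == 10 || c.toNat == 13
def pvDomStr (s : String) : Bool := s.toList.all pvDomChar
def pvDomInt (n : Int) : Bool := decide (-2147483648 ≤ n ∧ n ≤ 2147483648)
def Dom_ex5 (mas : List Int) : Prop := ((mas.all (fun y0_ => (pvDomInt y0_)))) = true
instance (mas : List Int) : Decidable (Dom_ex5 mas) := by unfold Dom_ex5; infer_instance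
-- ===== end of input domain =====

-- B drops Counter/most_common and any mapping entirely: a nested-scan brute force that, at each
-- first occurrence (tracked by a plain 'seen' list), appends all equal elements gathered by a
-- fresh scan of mas (alternative decomposition; no count table, no range(count) rebuild loop).

-- ===== PORT A =====
-- c.most_common() in A is computed and discarded (no side effect), so it leaves no trace here.
def ex5 (mas : List Int) : List Int :=
  let c := PySem.Dict.counter mas
  c.items.foldl
    (fun new_mas kv =>
      (PySem.List.pyRange 0 kv.2).foldl (fun new_mas _ => new_mas ++ [kv.1]) new_mas)
    []

-- ===== PORT B =====
-- state = (out, seen); 'x not in seen' guards; on a first occurrence the comprehension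
-- [y for y in mas if y == x] is a fresh filter pass over mas.
def ex5_alt (mas : List Int) : List Int :=
  (mas.foldl
    (fun (p : List Int × List Int) x =>
      if p.2.contains x then p
      else (p.1 ++ mas.filter (fun y => y == x), p.2 ++ [x]))
    ([], [])).1

-- ===== PRECONDITION & SPEC =====
def Spec_ex5 (mas : List Int) (out : List Int) : Prop := out = ex5_alt mas
instance (mas : List Int) (out : List Int) : Decidable (Spec_ex5 mas out) := by unfold Spec_ex5; infer_instance

-- ===== CLAIM (what is proved, stated in full; the proofs are below) =====
def Claim_equal_ex5 : Prop := ∀ (mas : List Int), Dom_ex5 mas → Spec_ex5 mas (ex5 mas)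

-- ===== LEMMAS AND PROOFS =====

-- A's outer loop over the counter items, characterised as a flatMap of replicates.
theorem ex5_outer (mas : List Int) (ks : List Int) (acc : List Int) :
    (ks.map (fun k => (k, (mas.count k : Int)))).foldl
        (fun new_mas kv =>
          (PySem.List.pyRange 0 kv.2).foldl (fun new_mas _ => new_mas ++ [kv.1]) new_mas)
        acc
      = acc ++ ks.flatMap (fun k => List.replicate (mas.count k) k) := by
  induction ks generalizing acc with
  | nil => simp
  | cons k ks ih => simp [List.append_assoc, Function.comp_def, List.flatMap_def]

-- the duplicates of x gathered by B's inner scan are exactly count-many copies of x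
theorem filter_eq_replicate (l : List Int) (x : Int) :
    l.filter (fun y => y == x) = List.replicate (l.count x) x := by
  induction l with
  | nil => simp
  | cons a l ih =>
    by_cases h : a = x
    · subst h; simp [List.filter_cons, ih, List.replicate_succ]
    · simp [List.filter_cons, h, ih]

-- the new first occurrences l contributes, given 'seen' was already seen
def dedupNew (seen l : List Int) : List Int :=
  match l with
  | [] => []
  | x :: l => if seen.contains x then dedupNew seen l else x :: dedupNew (seen ++ [x]) l

theorem update_eq_dedupNew (l seen : List Int) :
    PySem.Set.update seen l = seen ++ dedupNew seen l := by
  induction l generalizing seen with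
  | nil => simp [PySem.Set.update, dedupNew]
  | cons x l ih =>
    show PySem.Set.update (PySem.Set.add seen x) l = _
    by_cases h : x ∈ seen
    · simp [PySem.Set.add, h, ih, dedupNew]
    · simp [PySem.Set.add, h, ih, dedupNew]

-- B's loop invariant
theorem ex5_alt_inv (mas : List Int) (l seen out : List Int) :
    l.foldl
      (fun (p : List Int × List Int) x =>
        if p.2.contains x then p
        else (p.1 ++ mas.filter (fun y => y == x), p.2 ++ [x]))
      (out, seen)
    = (out ++ (dedupNew seen l).flatMap (fun k => mas.filter (fun y => y == k)),
       PySem.Set.update seen l) := by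
  induction l generalizing seen out with
  | nil => simp [dedupNew, PySem.Set.update]
  | cons x l ih =>
    rw [List.foldl_cons]
    by_cases h : x ∈ seen
    · have hupd : PySem.Set.update seen (x :: l) = PySem.Set.update seen l := by
        show PySem.Set.update (PySem.Set.add seen x) l = _
        simp [PySem.Set.add, h]
      simp only [hupd, dedupNew]
      rw [if_pos (show seen.contains x = true by simpa using h),
        if_pos (show seen.contains x = true by simpa using h)]
      exact ih seen out
    · have hupd : PySem.Set.update seen (x :: l) = PySem.Set.update (seen ++ [x]) l := by
        show PySem.Set.update (PySem.Set.add seen x) l = _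
        simp [PySem.Set.add, h]
      simp only [hupd, dedupNew]
      rw [if_neg (show ¬ seen.contains x = true by simpa using h),
        if_neg (show ¬ seen.contains x = true by simpa using h)]
      rw [ih]
      simp [List.append_assoc]

theorem ex5_eq (mas : List Int) : ex5 mas = ex5_alt mas := by
  unfold ex5 ex5_alt
  dsimp only
  rw [PySem.Dict.items_counter, ex5_outer, ex5_alt_inv]
  have h : dedupNew [] mas = PySem.Set.ofList mas := by
    have := update_eq_dedupNew mas []
    simpa [pysem] using this.symm
  simp [h, filter_eq_replicate]

-- ===== VERDICT (by name: the statement is the Claim_ definition above) =====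
theorem ex5_spec : Claim_equal_ex5 := by
  intro mas _
  unfold Spec_ex5
  exact ex5_eq mas
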